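-- pv_equiv track=rewrite | github.com/Jrc356/advent-of-code-2021 | day8/b/main.py | find_tl_bl
-- ===== SOURCE A (Python) =====
-- def find_tl_bl(l5):
--   x,y,z= l5
--   c=''
--   for e in x:
--     if e not in y+z:
--       c+=e
--   for e in y:
--     if e not in x+z:
--       c+=e
--   for e in z:
--     if e not in x+y:
--       c+=e
--   return(c)
-- ===== SOURCE B (Python) =====
-- def find_tl_bl(l5):
--   x, y, z = l5
--   count = {}
--   for s in (x, y, z):
--     for e in set(s):
--       count[e] = count.get(e, 0) + 1
--   return ''.join(e for s in (x, y, z) for e in s if count[e] == 1)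
-- ===== Notes on version B (the rewrite author's own statement) =====
-- stated objective: faster
-- what changed: Replaces the three repeated 'not in'-scans over concatenated strings with one precomputed per-character string-membership counter (built over set(s) of each string) followed by a single filtering pass.
import Mathlib
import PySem

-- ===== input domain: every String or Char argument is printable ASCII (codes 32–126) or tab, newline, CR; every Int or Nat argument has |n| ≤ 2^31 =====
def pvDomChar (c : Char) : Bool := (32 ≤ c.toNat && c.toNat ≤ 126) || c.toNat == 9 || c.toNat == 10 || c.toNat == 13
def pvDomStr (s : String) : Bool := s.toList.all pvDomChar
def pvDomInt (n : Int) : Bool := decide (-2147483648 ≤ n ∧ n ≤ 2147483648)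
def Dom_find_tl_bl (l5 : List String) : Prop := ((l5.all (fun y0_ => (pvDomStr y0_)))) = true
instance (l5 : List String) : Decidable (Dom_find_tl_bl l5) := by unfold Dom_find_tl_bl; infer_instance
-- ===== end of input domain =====

-- B replaces A's repeated quadratic 'not in' scans over concatenated strings by a
-- precomputed per-character counter of string membership plus one filtering pass.

-- ===== PORT A =====
def find_tl_bl (l5 : List String) : String :=
  match l5 with
  | [x, y, z] =>
    let xs := x.toList; let ys := y.toList; let zs := z.toList
    let c : List Char := []
    let c := xs.foldl (fun c e => if e ∉ ys ++ zs then c ++ [e] else c) c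
    let c := ys.foldl (fun c e => if e ∉ xs ++ zs then c ++ [e] else c) c
    let c := zs.foldl (fun c e => if e ∉ xs ++ ys then c ++ [e] else c) c
    String.ofList c
  | _ => ""  -- unreachable under Pre_: Python raises ValueError on unpacking

-- ===== PORT B =====
def find_tl_bl_alt (l5 : List String) : String :=
  match l5 with
  | [] => ""  -- unreachable under Pre_: Python raises ValueError on unpacking
  | [_] => ""
  | [_, _] => ""
  | x :: y :: z :: [] =>
    let strs := [x.toList, y.toList, z.toList]
    let count : PySem.Dict Char Int :=
      strs.foldl (fun d s =>
        (PySem.Set.ofList s).foldl (fun d e => d.modify e 0 (· + 1)) d) PySem.Dict.empty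
    String.ofList (strs.flatMap (fun s => s.filter (fun e => count.getD e 0 == 1)))
  | _ :: _ :: _ :: _ :: _ => ""

-- ===== PRECONDITION & SPEC =====
-- Pre_ excludes exactly the inputs on which A's unpacking 'x, y, z = l5' raises ValueError.
def Pre_find_tl_bl (l5 : List String) : Prop := l5.length = 3
instance (l5 : List String) : Decidable (Pre_find_tl_bl l5) := by unfold Pre_find_tl_bl; infer_instance
def pvWitness_find_tl_bl : List String := ["ab", "bc", "d"]

def Spec_find_tl_bl (l5 : List String) (out : String) : Prop := out = find_tl_bl_alt l5
instance (l5 : List String) (out : String) : Decidable (Spec_find_tl_bl l5 out) := by unfold Spec_find_tl_bl; infer_instance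

-- ===== CLAIM (what is proved, stated in full; the proofs are below) =====
def Claim_equal_find_tl_bl : Prop := ∀ (l5 : List String), Dom_find_tl_bl l5 → Pre_find_tl_bl l5 → Spec_find_tl_bl l5 (find_tl_bl l5)

-- ===== LEMMAS AND PROOFS =====

-- The counter's value at e is 1/0 per string according to membership.
theorem count_ofList_mem (s : List Char) (e : Char) :
    (PySem.Set.ofList s).count e = if e ∈ s then 1 else 0 := by
  by_cases h : e ∈ s
  · rw [if_pos h]
    exact List.count_eq_one_of_mem (PySem.Set.nodup_ofList s)
      (by simpa [PySem.Set.mem_ofList] using h)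
  · simp [h, List.count_eq_zero, PySem.Set.mem_ofList]

theorem getD_count3 (xs ys zs : List Char) (e : Char) :
    (([xs, ys, zs].foldl (fun d s =>
        (PySem.Set.ofList s).foldl (fun d e => d.modify e 0 (· + 1)) d) PySem.Dict.empty).getD e 0)
      = (if e ∈ xs then (1:Int) else 0) + (if e ∈ ys then 1 else 0) + (if e ∈ zs then 1 else 0) := by
  simp only [List.foldl]
  rw [PySem.Dict.getD_foldl_modify_add_one, PySem.Dict.getD_foldl_modify_add_one,
      PySem.Dict.getD_foldl_modify_add_one]
  simp [PySem.Dict.getD, PySem.Dict.get?, PySem.Dict.empty, count_ofList_mem]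

theorem filter_eq (s os1 os2 xs ys zs : List Char)
    (h : ∀ e ∈ s, (e ∉ os1 ++ os2) ↔
        ((if e ∈ xs then (1:Int) else 0) + (if e ∈ ys then 1 else 0) + (if e ∈ zs then 1 else 0) = 1)) :
    s.filter (fun e => decide (e ∉ os1 ++ os2))
      = s.filter (fun e =>
          (([xs, ys, zs].foldl (fun d s =>
            (PySem.Set.ofList s).foldl (fun d e => d.modify e 0 (· + 1)) d)
            (PySem.Dict.empty : PySem.Dict Char Int)).getD e 0) == 1) := by
  apply List.filter_congr
  intro e he
  rw [getD_count3, Bool.eq_iff_iff]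
  simp only [beq_iff_eq]
  simpa [not_or] using h e he

theorem find_tl_bl_spec : Claim_equal_find_tl_bl := by
  intro l5 _ hpre
  match l5 with
  | [x, y, z] =>
    show find_tl_bl [x, y, z] = find_tl_bl_alt [x, y, z]
    simp only [find_tl_bl, find_tl_bl_alt, List.flatMap_cons, List.flatMap_nil, List.append_nil,
      PySem.List.foldl_append_ite_eq_filter, List.nil_append]
    congr 1
    rw [filter_eq x.toList y.toList z.toList x.toList y.toList z.toList ?_,
        filter_eq y.toList x.toList z.toList x.toList y.toList z.toList ?_,
        filter_eq z.toList x.toList y.toList x.toList y.toList z.toList ?_]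
    · simp [List.append_assoc]
    · intro e he
      by_cases h1 : e ∈ x.toList <;> by_cases h2 : e ∈ y.toList <;> simp_all
    · intro e he
      by_cases h1 : e ∈ x.toList <;> by_cases h2 : e ∈ z.toList <;> simp_all
    · intro e he
      by_cases h1 : e ∈ y.toList <;> by_cases h2 : e ∈ z.toList <;> simp_all
  | [] => simp [Pre_find_tl_bl] at hpre
  | [_] => simp [Pre_find_tl_bl] at hpre
  | [_, _] => simp [Pre_find_tl_bl] at hpre
  | _ :: _ :: _ :: _ :: _ => simp [Pre_find_tl_bl] at hpre
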